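-- pv_equiv track=rewrite | github.com/yxqzme2/achievement-engine-wrapped | app/gear_engine.py | gear_stats
-- ===== SOURCE A (Python) =====
-- def gear_stats(equipped: dict) -> dict:
--     """Sum stats across all equipped items."""
--     totals = {"str": 0, "mag": 0, "def": 0, "hp": 0}
--     for item in equipped.values():
--         if not item:
--             continue
--         for stat in totals:
--             totals[stat] += int(item.get(stat, 0) or 0)
--     return totals
-- ===== SOURCE B (Python) =====
-- def gear_stats(equipped: dict) -> dict:
--     """Sum stats across all equipped items."""
--     totals = {"str": 0, "mag": 0, "def": 0, "hp": 0}
--     for item in equipped.values():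
--         for key, value in (item or {}).items():
--             if key in totals:
--                 totals[key] += int(value or 0)
--     return totals
-- ===== Notes on version B (the rewrite author's own statement) =====
-- stated objective: alternative
-- what changed: Instead of probing each item with .get for each of the four stat names, B scatter-adds: it scans each item's own (key, value) entries once and adds value into totals only when the key is one of the four tracked stats, dropping the per-stat lookup loop entirely.
import Mathlib
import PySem

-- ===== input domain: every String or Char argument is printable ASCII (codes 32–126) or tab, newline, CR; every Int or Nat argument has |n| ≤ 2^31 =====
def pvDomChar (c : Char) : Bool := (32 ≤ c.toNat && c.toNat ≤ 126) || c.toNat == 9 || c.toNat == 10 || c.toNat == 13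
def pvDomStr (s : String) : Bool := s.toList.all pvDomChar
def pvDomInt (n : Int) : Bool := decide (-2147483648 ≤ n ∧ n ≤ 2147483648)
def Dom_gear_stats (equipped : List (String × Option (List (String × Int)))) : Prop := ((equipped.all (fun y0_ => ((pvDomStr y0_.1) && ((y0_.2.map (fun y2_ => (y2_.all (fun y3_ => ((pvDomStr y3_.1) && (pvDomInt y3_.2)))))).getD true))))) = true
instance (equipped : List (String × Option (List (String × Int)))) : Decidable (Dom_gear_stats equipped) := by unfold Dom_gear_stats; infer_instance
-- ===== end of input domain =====

-- B replaces A's per-stat probing (.get of each of the four stat names per item) by a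
-- scatter-add over each item's own (key, value) entries, filtered by membership in totals
-- (objective: alternative traversal of the same data).

-- ===== PORT A =====
-- accumulate into a mutable totals dict; per item, loop over the four stat keys and .get each
def gear_stats (equipped : List (String × Option (List (String × Int)))) : List (String × Int) :=
  let totals : PySem.Dict String Int :=
    PySem.Dict.mk [("str", 0), ("mag", 0), ("def", 0), ("hp", 0)]
  (((PySem.Dict.mk equipped).values).foldl (fun totals item =>
    match item with
    | none => totals                      -- `if not item: continue` (None)
    | some its =>
      if its = [] then totals             -- `if not item: continue` (empty dict)
      else
        totals.keys.foldl (fun t stat =>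
          -- totals[stat] += int(item.get(stat, 0) or 0)
          t.insert stat (t.getD stat 0 +
            (let v := (PySem.Dict.mk its).getD stat 0; if v = 0 then 0 else v)))
          totals) totals).items

-- ===== PORT B =====
-- body of B's inner loop: `if key in totals: totals[key] += int(value or 0)`
def gsStep (t : PySem.Dict String Int) (kv : String × Int) : PySem.Dict String Int :=
  if t.contains kv.1 then                                     -- if key in totals
    t.insert kv.1 (t.getD kv.1 0 + (if kv.2 = 0 then 0 else kv.2))  -- totals[key] += int(value or 0)
  else t

-- per item, scan the item's own entries and add each value whose key is a tracked stat
def gear_stats_alt (equipped : List (String × Option (List (String × Int)))) : List (String × Int) :=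
  let totals : PySem.Dict String Int :=
    PySem.Dict.mk [("str", 0), ("mag", 0), ("def", 0), ("hp", 0)]
  (((PySem.Dict.mk equipped).values).foldl (fun totals item =>
    ((PySem.Dict.mk (item.getD [])).items).foldl gsStep totals)  -- for key, value in (item or {}).items()
    totals).items

-- ===== PRECONDITION & SPEC =====
-- Pre_ excludes equipped values whose association list carries a duplicate key: no Python dict
-- produces such a list, and on them A's first-match .get and B's visit-every-entry scan are
-- both defensible readings of a list that represents no dict.
def Pre_gear_stats (equipped : List (String × Option (List (String × Int)))) : Prop :=
  ∀ p ∈ equipped, ((p.2.getD []).map Prod.fst).Nodup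
instance (equipped : List (String × Option (List (String × Int)))) : Decidable (Pre_gear_stats equipped) := by unfold Pre_gear_stats; infer_instance

def pvWitness_gear_stats : (List (String × Option (List (String × Int)))) :=
  [("helm", some [("str", 2), ("hp", 5)]), ("ring", none), ("belt", some [])]

def Spec_gear_stats (equipped : List (String × Option (List (String × Int)))) (out : List (String × Int)) : Prop := out = gear_stats_alt equipped
instance (equipped : List (String × Option (List (String × Int)))) (out : List (String × Int)) : Decidable (Spec_gear_stats equipped out) := by unfold Spec_gear_stats; infer_instance

-- ===== CLAIM (what is proved, stated in full; the proofs are below) =====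
def Claim_equal_gear_stats : Prop := ∀ (equipped : List (String × Option (List (String × Int)))), Dom_gear_stats equipped → Pre_gear_stats equipped → Spec_gear_stats equipped (gear_stats equipped)

-- ===== LEMMAS AND PROOFS =====

-- int(v or 0) on an int v
def gsCoerce (v : Int) : Int := if v = 0 then 0 else v

-- per-item contribution of one stat, as A computes it (first-match .get)
def gsContrib (stat : String) (item : Option (List (String × Int))) : Int :=
  match item with
  | none => 0
  | some its =>
    if its = [] then 0
    else gsCoerce ((PySem.Dict.mk its).getD stat 0)

-- per-item contribution of one stat, as B computes it (sum of matching entries)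
def gsScatter (stat : String) (item : Option (List (String × Int))) : Int :=
  (((item.getD []).filter (fun p => p.1 = stat)).map (fun p => gsCoerce p.2)).sum

-- A's inner loop over the four keys, from a literal four-entry dict
theorem gsA_step (a b c d : Int) (its : List (String × Int)) :
    ((PySem.Dict.mk [("str", a), ("mag", b), ("def", c), ("hp", d)]).keys).foldl
      (fun (t : PySem.Dict String Int) stat =>
        t.insert stat (t.getD stat 0 +
          (let v := (PySem.Dict.mk its).getD stat 0; if v = 0 then 0 else v)))
      (PySem.Dict.mk [("str", a), ("mag", b), ("def", c), ("hp", d)])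
    = PySem.Dict.mk [("str", a + gsContrib "str" (some its)),
        ("mag", b + gsContrib "mag" (some its)),
        ("def", c + gsContrib "def" (some its)),
        ("hp", d + gsContrib "hp" (some its))] := by
  by_cases h : its = []
  · subst h
    simp [PySem.Dict.keys, PySem.Dict.insert, PySem.Dict.getD,
      PySem.Dict.get?, PySem.Dict.contains, List.foldl, gsContrib]
  · simp [PySem.Dict.keys, PySem.Dict.insert, PySem.Dict.getD,
      PySem.Dict.get?, PySem.Dict.contains, List.foldl, gsContrib, gsCoerce, h]

-- A's outer fold from any literal four-entry totals dict: four independent first-match sums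
theorem gsA_inv (vals : List (Option (List (String × Int)))) (a b c d : Int) :
    (vals.foldl (fun totals item =>
      match item with
      | none => totals
      | some its =>
        if its = [] then totals
        else
          totals.keys.foldl (fun (t : PySem.Dict String Int) stat =>
            t.insert stat (t.getD stat 0 +
              (let v := (PySem.Dict.mk its).getD stat 0; if v = 0 then 0 else v)))
            totals)
      (PySem.Dict.mk [("str", a), ("mag", b), ("def", c), ("hp", d)])).items
    = [("str", a + (vals.map (gsContrib "str")).sum),
       ("mag", b + (vals.map (gsContrib "mag")).sum),
       ("def", c + (vals.map (gsContrib "def")).sum),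
       ("hp", d + (vals.map (gsContrib "hp")).sum)] := by
  induction vals generalizing a b c d with
  | nil => simp
  | cons x xs ih =>
    cases x with
    | none => simp [List.foldl, gsContrib, ih]
    | some its =>
      by_cases h : its = []
      · simp [List.foldl, h, gsContrib, ih]
      · rw [List.foldl_cons]
        simp only [h, if_false]
        rw [gsA_step, ih]
        simp [gsContrib, h, add_assoc]

-- B's inner scatter loop over one entry list, from a literal four-entry dict
theorem gsB_step (a b c d : Int) (L : List (String × Int)) :
    L.foldl gsStep (PySem.Dict.mk [("str", a), ("mag", b), ("def", c), ("hp", d)])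
    = PySem.Dict.mk
        [("str", a + ((L.filter (fun p => p.1 = "str")).map (fun p => gsCoerce p.2)).sum),
         ("mag", b + ((L.filter (fun p => p.1 = "mag")).map (fun p => gsCoerce p.2)).sum),
         ("def", c + ((L.filter (fun p => p.1 = "def")).map (fun p => gsCoerce p.2)).sum),
         ("hp", d + ((L.filter (fun p => p.1 = "hp")).map (fun p => gsCoerce p.2)).sum)] := by
  induction L generalizing a b c d with
  | nil => simp
  | cons kv rest ih =>
    obtain ⟨k, v⟩ := kv
    rw [List.foldl_cons]
    by_cases h1 : k = "str"
    · subst h1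
      have hstep : gsStep (PySem.Dict.mk [("str", a), ("mag", b), ("def", c), ("hp", d)]) ("str", v)
          = PySem.Dict.mk [("str", a + (if v = 0 then 0 else v)), ("mag", b), ("def", c), ("hp", d)] := by
        simp [gsStep, PySem.Dict.contains, PySem.Dict.insert, PySem.Dict.getD, PySem.Dict.get?]
      rw [hstep, ih]
      simp [gsCoerce, add_assoc]
    · by_cases h2 : k = "mag"
      · subst h2
        have hstep : gsStep (PySem.Dict.mk [("str", a), ("mag", b), ("def", c), ("hp", d)]) ("mag", v)
            = PySem.Dict.mk [("str", a), ("mag", b + (if v = 0 then 0 else v)), ("def", c), ("hp", d)] := by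
          simp [gsStep, PySem.Dict.contains, PySem.Dict.insert, PySem.Dict.getD, PySem.Dict.get?]
        rw [hstep, ih]
        simp [gsCoerce, add_assoc]
      · by_cases h3 : k = "def"
        · subst h3
          have hstep : gsStep (PySem.Dict.mk [("str", a), ("mag", b), ("def", c), ("hp", d)]) ("def", v)
              = PySem.Dict.mk [("str", a), ("mag", b), ("def", c + (if v = 0 then 0 else v)), ("hp", d)] := by
            simp [gsStep, PySem.Dict.contains, PySem.Dict.insert, PySem.Dict.getD, PySem.Dict.get?]
          rw [hstep, ih]
          simp [gsCoerce, add_assoc]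
        · by_cases h4 : k = "hp"
          · subst h4
            have hstep : gsStep (PySem.Dict.mk [("str", a), ("mag", b), ("def", c), ("hp", d)]) ("hp", v)
                = PySem.Dict.mk [("str", a), ("mag", b), ("def", c), ("hp", d + (if v = 0 then 0 else v))] := by
              simp [gsStep, PySem.Dict.contains, PySem.Dict.insert, PySem.Dict.getD, PySem.Dict.get?]
            rw [hstep, ih]
            simp [gsCoerce, add_assoc]
          · have hstep : gsStep (PySem.Dict.mk [("str", a), ("mag", b), ("def", c), ("hp", d)]) (k, v)
                = PySem.Dict.mk [("str", a), ("mag", b), ("def", c), ("hp", d)] := by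
              simp [gsStep, PySem.Dict.contains, Ne.symm h1, Ne.symm h2, Ne.symm h3, Ne.symm h4]
            rw [hstep, ih]
            simp [h1, h2, h3, h4]

-- B's outer fold: four independent scatter sums
theorem gsB_inv (vals : List (Option (List (String × Int)))) (a b c d : Int) :
    (vals.foldl (fun totals item =>
      ((PySem.Dict.mk (item.getD [])).items).foldl gsStep totals)
      (PySem.Dict.mk [("str", a), ("mag", b), ("def", c), ("hp", d)])).items
    = [("str", a + (vals.map (gsScatter "str")).sum),
       ("mag", b + (vals.map (gsScatter "mag")).sum),
       ("def", c + (vals.map (gsScatter "def")).sum),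
       ("hp", d + (vals.map (gsScatter "hp")).sum)] := by
  induction vals generalizing a b c d with
  | nil => simp
  | cons x xs ih =>
    rw [List.foldl_cons]
    rw [show (PySem.Dict.mk (x.getD [])).items = x.getD [] from rfl]
    rw [gsB_step, ih]
    simp [gsScatter, add_assoc]

-- with no duplicate keys, the filter-sum equals the first-match lookup (coerced)
theorem gsFilter_sum (stat : String) (its : List (String × Int))
    (h : (its.map Prod.fst).Nodup) :
    ((its.filter (fun p => p.1 = stat)).map (fun p => gsCoerce p.2)).sum
      = gsCoerce ((PySem.Dict.mk its).getD stat 0) := by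
  induction its with
  | nil => simp [PySem.Dict.getD, PySem.Dict.get?, gsCoerce]
  | cons kv rest ih =>
    obtain ⟨k, v⟩ := kv
    simp only [List.map_cons, List.nodup_cons] at h
    obtain ⟨hk, hrest⟩ := h
    rw [PySem.Dict.getD_eq_get?_getD, PySem.Dict.get?_mk_cons]
    by_cases hs : k = stat
    · subst hs
      have hfil : rest.filter (fun p => p.1 = k) = [] := by
        rw [List.filter_eq_nil_iff]
        intro p hp
        simp only [decide_eq_true_eq]
        intro hpk
        exact hk (hpk ▸ List.mem_map_of_mem hp)
      simp [hfil]
    · have hbe : (k == stat) = false := by simpa using hs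
      rw [hbe]
      simp only [List.filter_cons]
      rw [if_neg (by simpa using hs)]
      rw [PySem.Dict.getD_eq_get?_getD] at ih
      simpa using ih hrest

-- on an entry list with no duplicate keys, the scatter sum is A's first-match contribution
theorem gsScatter_eq_contrib (stat : String) (item : Option (List (String × Int)))
    (h : ((item.getD []).map Prod.fst).Nodup) :
    gsScatter stat item = gsContrib stat item := by
  cases item with
  | none => simp [gsScatter, gsContrib]
  | some its =>
    cases its with
    | nil => simp [gsScatter, gsContrib]
    | cons kv rest =>
      simp only [Option.getD] at h
      simp only [gsScatter, gsContrib, Option.getD]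
      rw [if_neg (by simp)]
      exact gsFilter_sum stat (kv :: rest) h

-- ===== VERDICT (by name: the statement is the Claim_ definition above) =====
theorem gear_stats_spec : Claim_equal_gear_stats := by
  intro equipped _ hpre
  unfold Spec_gear_stats gear_stats gear_stats_alt
  rw [gsA_inv, gsB_inv]
  have hmap : ∀ stat : String,
      (((PySem.Dict.mk equipped).values).map (gsScatter stat)).sum
        = (((PySem.Dict.mk equipped).values).map (gsContrib stat)).sum := by
    intro stat
    congr 1
    apply List.map_congr_left
    intro item hitem
    have : ∃ p ∈ equipped, p.2 = item := by
      simpa [PySem.Dict.values, PySem.Dict.mk] using hitem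
    obtain ⟨p, hp, hpe⟩ := this
    exact gsScatter_eq_contrib stat item (hpe ▸ hpre p hp)
  rw [hmap, hmap, hmap, hmap]
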